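-- pv_equiv track=rewrite | github.com/R-Mussabayev/semantilib | clus2vec.py | tokenlist_to_targetdict
-- ===== SOURCE A (Python) =====
-- def tokenlist_to_targetdict(token_list, target_token_mask):
--     target_token_dict = dict()
--     j = 0
--     for i in range(len(token_list)):
--         if target_token_mask[i]:
--             target_token_dict[token_list[i]] = j
--             j += 1
--         else:
--             target_token_dict[token_list[i]] = -1
--     return target_token_dict
-- ===== SOURCE B (Python) =====
-- def tokenlist_to_targetdict(token_list, target_token_mask):
--     n = len(token_list)
--     flags = [1 if target_token_mask[i] else 0 for i in range(n)]
--     prefix = [0]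
--     for f in flags:
--         prefix.append(prefix[-1] + f)
--     return {token_list[i]: (prefix[i] if flags[i] else -1) for i in range(n)}
-- ===== Notes on version B (the rewrite author's own statement) =====
-- stated objective: alternative
-- what changed: Replaces A's single streaming counter loop with three separate passes: a 0/1 flags table, an exclusive prefix-sum table, and a final assembly pass that reads the target index out of the table.
import Mathlib
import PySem

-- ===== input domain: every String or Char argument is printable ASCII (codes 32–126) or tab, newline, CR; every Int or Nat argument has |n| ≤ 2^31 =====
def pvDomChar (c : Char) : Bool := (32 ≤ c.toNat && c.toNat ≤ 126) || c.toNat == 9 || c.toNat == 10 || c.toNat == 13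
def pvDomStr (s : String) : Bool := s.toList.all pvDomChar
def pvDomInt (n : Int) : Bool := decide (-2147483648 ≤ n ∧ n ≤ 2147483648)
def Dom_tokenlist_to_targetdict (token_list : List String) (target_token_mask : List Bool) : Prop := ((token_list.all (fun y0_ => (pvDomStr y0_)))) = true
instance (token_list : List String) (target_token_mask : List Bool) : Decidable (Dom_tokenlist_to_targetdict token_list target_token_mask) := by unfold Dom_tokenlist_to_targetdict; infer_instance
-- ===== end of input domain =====

-- B replaces A's streaming counter with a flags table, an exclusive prefix-sum table and a
-- separate assembly pass (alternative decomposition, same O(n) cost).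

-- ===== PORT A =====
def tokenlist_to_targetdict (token_list : List String) (target_token_mask : List Bool) : List (String × Int) :=
  ((PySem.List.pyRange 0 (token_list.length : Int) 1).foldl
    (fun (st : PySem.Dict String Int × Int) i =>
      if PySem.List.pyGetD target_token_mask i false then
        (st.1.insert (PySem.List.pyGetD token_list i "") st.2, st.2 + 1)
      else
        (st.1.insert (PySem.List.pyGetD token_list i "") (-1), st.2))
    (PySem.Dict.empty, 0)).1.items

-- ===== PORT B =====
def tokenlist_to_targetdict_alt (token_list : List String) (target_token_mask : List Bool) : List (String × Int) :=
  let n : Int := token_list.length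
  let flags : List Int := (PySem.List.pyRange 0 n 1).map
    (fun i => if PySem.List.pyGetD target_token_mask i false then 1 else 0)
  let pre : List Int := flags.foldl (fun p f => p ++ [PySem.List.pyGetD p (-1) 0 + f]) [0]
  ((PySem.List.pyRange 0 n 1).foldl
    (fun (d : PySem.Dict String Int) i =>
      d.insert (PySem.List.pyGetD token_list i "")
        (if PySem.List.pyGetD flags i 0 ≠ 0 then PySem.List.pyGetD pre i 0 else -1))
    PySem.Dict.empty).items

-- ===== PRECONDITION & SPEC =====
-- Pre_: Python A raises IndexError when the mask is shorter than the token list (so does B).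
def Pre_tokenlist_to_targetdict (token_list : List String) (target_token_mask : List Bool) : Prop :=
  token_list.length ≤ target_token_mask.length
instance (token_list : List String) (target_token_mask : List Bool) : Decidable (Pre_tokenlist_to_targetdict token_list target_token_mask) := by unfold Pre_tokenlist_to_targetdict; infer_instance

def pvWitness_tokenlist_to_targetdict : List String × List Bool := (["a", "b", "a"], [true, false, true])

def Spec_tokenlist_to_targetdict (token_list : List String) (target_token_mask : List Bool) (out : List (String × Int)) : Prop := out = tokenlist_to_targetdict_alt token_list target_token_mask
instance (token_list : List String) (target_token_mask : List Bool) (out : List (String × Int)) : Decidable (Spec_tokenlist_to_targetdict token_list target_token_mask out) := by unfold Spec_tokenlist_to_targetdict; infer_instance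

-- ===== CLAIM (what is proved, stated in full; the proofs are below) =====
def Claim_equal_tokenlist_to_targetdict : Prop := ∀ (token_list : List String) (target_token_mask : List Bool), Dom_tokenlist_to_targetdict token_list target_token_mask → Pre_tokenlist_to_targetdict token_list target_token_mask → Spec_tokenlist_to_targetdict token_list target_token_mask (tokenlist_to_targetdict token_list target_token_mask)

-- ===== LEMMAS AND PROOFS =====

-- partial sums of a list starting from s (one entry per element)
def pvPartial (s : Int) : List Int → List Int
  | [] => []
  | f :: fs => (s + f) :: pvPartial (s + f) fs

-- B's prefix loop computes [0] ++ partial sums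
lemma prefix_fold_eq (flags : List Int) (p0 : List Int) (h : p0 ≠ []) :
    flags.foldl (fun p f => p ++ [PySem.List.pyGetD p (-1) 0 + f]) p0
      = p0 ++ pvPartial (p0.getLast h) flags := by
  induction flags generalizing p0 with
  | nil => simp [pvPartial]
  | cons f fs ih =>
    have hne : p0 ++ [p0.getLast h + f] ≠ [] := by simp
    rw [List.foldl_cons, PySem.List.pyGetD_neg_one p0 0 h, ih _ hne]
    have : (p0 ++ [p0.getLast h + f]).getLast hne = p0.getLast h + f := by
      simp
    rw [this]
    simp [pvPartial]

lemma pvPartial_getD (flags : List Int) (s : Int) (i : Nat) (hi : i < flags.length) :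
    (pvPartial s flags).getD i 0 = s + (flags.take (i + 1)).sum := by
  induction flags generalizing s i with
  | nil => simp at hi
  | cons f fs ih =>
    cases i with
    | zero => simp [pvPartial]
    | succ k =>
      simp only [pvPartial, List.getD_cons_succ, List.take_succ_cons, List.sum_cons]
      rw [ih (s + f) k (by simpa using hi)]
      ring

-- value of pre[i] for 0 ≤ i ≤ n: exclusive prefix sum
lemma pre_getD (flags : List Int) (i : Nat) (hi : i ≤ flags.length) :
    ([0] ++ pvPartial 0 flags).getD i 0 = (flags.take i).sum := by
  cases i with
  | zero => simp
  | succ k =>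
    simp only [List.cons_append, List.nil_append, List.getD_cons_succ]
    rw [pvPartial_getD flags 0 k (by omega)]
    simp

-- main invariant: A's fold over the first k indices equals B's fold, and A's counter
-- equals the exclusive prefix sum at k
lemma main_inv (tl : List String) (mask : List Bool) (_hpre : tl.length ≤ mask.length)
    (flags : List Int)
    (hflags : flags = (PySem.List.pyRange 0 (tl.length : Int) 1).map
      (fun i => if PySem.List.pyGetD mask i false then 1 else 0))
    (pre : List Int) (hpref : pre = [0] ++ pvPartial 0 flags)
    (k : Nat) (hk : k ≤ tl.length) :
    (PySem.List.pyRange 0 (k : Int) 1).foldl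
      (fun (st : PySem.Dict String Int × Int) i =>
        if PySem.List.pyGetD mask i false then
          (st.1.insert (PySem.List.pyGetD tl i "") st.2, st.2 + 1)
        else
          (st.1.insert (PySem.List.pyGetD tl i "") (-1), st.2))
      (PySem.Dict.empty, 0)
    = ((PySem.List.pyRange 0 (k : Int) 1).foldl
        (fun (d : PySem.Dict String Int) i =>
          d.insert (PySem.List.pyGetD tl i "")
            (if PySem.List.pyGetD flags i 0 ≠ 0 then PySem.List.pyGetD pre i 0 else -1))
        PySem.Dict.empty,
       (flags.take k).sum) := by
  have hlen : flags.length = tl.length := by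
    subst hflags; simp [PySem.List.length_pyRange_one]
  induction k with
  | zero => simp [PySem.List.pyRange_one_eq_nil]
  | succ m ih =>
    have hm : m ≤ tl.length := by omega
    have hsplit : PySem.List.pyRange 0 ((m : Nat) + 1 : Int) 1
        = PySem.List.pyRange 0 (m : Int) 1 ++ [(m : Int)] := by
      exact PySem.List.pyRange_one_succ_right (by positivity)
    have hcast : ((Nat.succ m : Nat) : Int) = ((m : Nat) : Int) + 1 := by push_cast; ring
    rw [hcast, hsplit, List.foldl_append, List.foldl_append, ih hm]
    -- evaluate the last step
    have hflagm : PySem.List.pyGetD flags (m : Int) 0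
        = (if PySem.List.pyGetD mask (m : Int) false then 1 else 0) := by
      rw [hflags]
      exact PySem.List.pyGetD_map_pyRange_of_nonneg _ _ _ _ (by positivity) (by exact_mod_cast (by omega : m < tl.length))
    have hprem : PySem.List.pyGetD pre (m : Int) 0 = (flags.take m).sum := by
      rw [hpref, PySem.List.pyGetD_natCast]
      exact pre_getD flags m (by omega)
    have htake : flags.take (m + 1) = flags.take m ++ [PySem.List.pyGetD flags (m : Int) 0] := by
      rw [PySem.List.pyGetD_natCast]
      have hmlen : m < flags.length := by omega
      rw [List.getD_eq_getElem flags 0 hmlen]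
      exact List.take_succ_eq_append_getElem hmlen
    simp only [List.foldl_cons, List.foldl_nil]
    by_cases hmask : PySem.List.pyGetD mask (m : Int) false
    · simp [hmask, hflagm, hprem, htake]
    · simp [hmask, hflagm, htake, eq_comm]

-- ===== VERDICT (by name: the statement is the Claim_ definition above) =====
theorem tokenlist_to_targetdict_spec : Claim_equal_tokenlist_to_targetdict := by
  intro tl mask _ hpre
  unfold Spec_tokenlist_to_targetdict tokenlist_to_targetdict tokenlist_to_targetdict_alt
  simp only []
  set flags : List Int := (PySem.List.pyRange 0 (tl.length : Int) 1).map
    (fun i => if PySem.List.pyGetD mask i false then 1 else 0) with hflags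
  have hpref : flags.foldl (fun p f => p ++ [PySem.List.pyGetD p (-1) 0 + f]) [0]
      = [0] ++ pvPartial 0 flags := by
    have := prefix_fold_eq flags [0] (by simp)
    simpa using this
  rw [hpref]
  have := main_inv tl mask hpre flags hflags ([0] ++ pvPartial 0 flags) rfl tl.length le_rfl
  rw [this]
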